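-- pv_equiv track=rewrite | github.com/SSH1007/Algorithm | 프로그래머스/unrated/181855. 문자열 묶기/문자열 묶기.py | solution
-- ===== SOURCE A (Python) =====
-- def solution(strArr):
--     answer = 0
--     dic = dict()
--     for s in strArr:
--         if len(s) not in dic:
--             dic[len(s)] = 1
--         else:
--             dic[len(s)] += 1
--     lst= list(dic.values())
--     lst.sort(reverse = True)
--     answer = lst[0]
--     return answer
-- ===== SOURCE B (Python) =====
-- def solution(strArr):
--     lengths = sorted(len(s) for s in strArr)
--     best = 0
--     run = 0
--     prev = None
--     for n in lengths:
--         if prev == n: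
--             run += 1
--         else:
--             run = 1
--             prev = n
--         best = max(best, run)
--     return best
-- ===== Notes on version B (the rewrite author's own statement) =====
-- stated objective: alternative
-- what changed: Replaces the dict-counter plus full descending sort of the counts by a sort of the lengths followed by a single run-counting pass that keeps a running maximum.
import Mathlib
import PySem

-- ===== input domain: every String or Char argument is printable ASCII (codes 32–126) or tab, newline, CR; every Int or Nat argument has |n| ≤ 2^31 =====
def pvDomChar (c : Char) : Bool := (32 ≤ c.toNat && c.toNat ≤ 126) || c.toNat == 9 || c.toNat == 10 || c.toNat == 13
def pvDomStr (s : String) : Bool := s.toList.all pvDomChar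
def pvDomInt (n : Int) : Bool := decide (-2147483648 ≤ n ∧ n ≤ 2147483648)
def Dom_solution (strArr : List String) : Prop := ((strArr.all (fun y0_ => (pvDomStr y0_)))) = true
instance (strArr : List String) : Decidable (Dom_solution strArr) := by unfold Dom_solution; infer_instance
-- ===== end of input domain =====

-- B replaces A's dict counter + descending sort of the counts by sorting the lengths and one
-- run-counting pass with a running maximum (alternative decomposition, same asymptotic cost).

-- ===== PORT A =====
def solution (strArr : List String) : Int :=
  let dic := strArr.foldl (fun d s =>
      if d.contains (PySem.Str.len s) = false then d.insert (PySem.Str.len s) 1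
      else d.insert (PySem.Str.len s) (d.getD (PySem.Str.len s) 0 + 1)) PySem.Dict.empty
  let lst := dic.values
  let lst2 := PySem.List.sorted lst (fun x => x) true
  (PySem.List.pyGet? lst2 0).getD 0   -- lst[0]: the IndexError case (none) is excluded by Pre_solution

-- ===== PORT B =====
-- one step of B's loop body: update (best, run, prev) with the next length n
def solutionAltStep (st : Int × Int × Option Int) (n : Int) : Int × Int × Option Int :=
  let (best, run, prev) := st
  let (run', prev') := if prev = some n then (run + 1, prev) else ((1 : Int), some n)
  (max best run', run', prev')

def solution_alt (strArr : List String) : Int :=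
  let lengths := PySem.List.sorted (strArr.map (fun s => PySem.Str.len s)) (fun x => x) false
  (lengths.foldl solutionAltStep (0, 0, none)).1

-- ===== PRECONDITION & SPEC =====
-- Pre_ excludes only the empty list, on which A raises IndexError (lst[0] of an empty list).
def Pre_solution (strArr : List String) : Prop := strArr ≠ []
instance (strArr : List String) : Decidable (Pre_solution strArr) := by unfold Pre_solution; infer_instance

def pvWitness_solution : List String := (["a", "bb", "c"])

def Spec_solution (strArr : List String) (out : Int) : Prop := out = solution_alt strArr
instance (strArr : List String) (out : Int) : Decidable (Spec_solution strArr out) := by unfold Spec_solution; infer_instance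

-- ===== CLAIM (what is proved, stated in full; the proofs are below) =====
def Claim_equal_solution : Prop := ∀ (strArr : List String), Dom_solution strArr → Pre_solution strArr → Spec_solution strArr (solution strArr)

-- ===== LEMMAS AND PROOFS =====

-- A's dict-building loop builds Counter(lengths)
lemma solution_dic_eq (strArr : List String) :
    strArr.foldl (fun d s =>
      if d.contains (PySem.Str.len s) = false then d.insert (PySem.Str.len s) 1
      else d.insert (PySem.Str.len s) (d.getD (PySem.Str.len s) 0 + 1)) PySem.Dict.empty
    = PySem.Dict.counter (strArr.map (fun s => PySem.Str.len s)) := by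
  rw [← PySem.Dict.foldl_insert_getD_add_one_eq_counter, List.foldl_map]
  congr 1
  funext d s
  by_cases h : d.contains (PySem.Str.len s) = false
  · rw [if_pos h, PySem.Dict.getD_of_not_contains d _ h]
    norm_num
  · rw [if_neg h]

-- in a (·≤·)-sorted nonempty list every element is ≤ the last one
lemma le_getLast_of_pairwise (P : List Int) (h : P.Pairwise (· ≤ ·)) (hne : P ≠ [])
    (a : Int) (ha : a ∈ P) : a ≤ P.getLast hne := by
  induction P with
  | nil => exact absurd rfl hne
  | cons x t ih =>
    rcases List.pairwise_cons.mp h with ⟨hx, ht⟩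
    by_cases hte : t = []
    · subst hte; simp at ha; simp [ha]
    · rw [List.getLast_cons hte]
      rcases List.mem_cons.mp ha with rfl | hat
      · exact hx _ (List.getLast_mem hte)
      · exact ih ht hte hat

-- invariant of B's run-counting fold on a (·≤·)-sorted nonempty list: prev is the last
-- element, run is its multiplicity, and best is the maximal multiplicity (attained)
lemma run_fold_inv (S : List Int) (hs : S.Pairwise (· ≤ ·)) (hne : S ≠ []) :
    (S.foldl solutionAltStep (0, 0, none)).2.2 = some (S.getLast hne)
    ∧ (S.foldl solutionAltStep (0, 0, none)).2.1 = (S.count (S.getLast hne) : Int)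
    ∧ (∃ v ∈ S, (S.foldl solutionAltStep (0, 0, none)).1 = (S.count v : Int))
    ∧ (∀ v ∈ S, (S.count v : Int) ≤ (S.foldl solutionAltStep (0, 0, none)).1) := by
  induction S using List.reverseRecOn with
  | nil => exact absurd rfl hne
  | append_singleton P x ih =>
    by_cases hPne : P = []
    · subst hPne
      simp [solutionAltStep]
    · have hsplit := List.pairwise_append.mp hs
      have hP : P.Pairwise (· ≤ ·) := hsplit.1
      have hle : ∀ a ∈ P, a ≤ x := fun a ha => hsplit.2.2 a ha x (by simp)
      obtain ⟨h1, h2, ⟨v0, hv0, hb0⟩, h4⟩ := ih hP hPne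
      set st := P.foldl solutionAltStep (0, 0, none) with hst
      have hfold : (P ++ [x]).foldl solutionAltStep (0, 0, none) = solutionAltStep st x := by
        rw [List.foldl_append]; rfl
      rw [hfold]
      simp only [List.getLast_concat]
      have hcnt : ∀ v, (P ++ [x]).count v = P.count v + if v = x then 1 else 0 := by
        intro v
        rcases eq_or_ne v x with rfl | hvx
        · simp [List.count_append]
        · simp [List.count_append, Ne.symm hvx, hvx]
      by_cases hx : P.getLast hPne = x
      · -- x equals the previous element: the run continues
        have h2' : st.2.1 = (P.count x : Int) := by rw [h2, hx]
        have hcond : st.2.2 = some x := by rw [h1, hx]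
        have hstep : solutionAltStep st x = (max st.1 (st.2.1 + 1), st.2.1 + 1, st.2.2) := by
          simp [solutionAltStep, hcond]
        rw [hstep]
        refine ⟨hcond, ?_, ?_, ?_⟩
        · rw [hcnt x, if_pos rfl, h2']; push_cast; ring
        · rcases le_total (st.2.1 + 1) st.1 with hge | hlt
          · refine ⟨v0, by simp [hv0], ?_⟩
            have hvx : v0 ≠ x := by
              intro he; rw [he, ← h2'] at hb0; omega
            rw [max_eq_left hge, hcnt v0, if_neg hvx, hb0]; push_cast; ring
          · refine ⟨x, by simp, ?_⟩
            rw [max_eq_right hlt, hcnt x, if_pos rfl, h2']; push_cast; ring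
        · intro v hv
          have hmaxl := le_max_left st.1 (st.2.1 + 1)
          have hmaxr := le_max_right st.1 (st.2.1 + 1)
          rcases eq_or_ne v x with rfl | hvex
          · rw [hcnt v, if_pos rfl]
            push_cast
            omega
          · rcases List.mem_append.mp hv with hvP | hvx
            · rw [hcnt v, if_neg hvex]
              have := h4 v hvP
              push_cast
              omega
            · simp at hvx; exact absurd hvx hvex
      · -- x is strictly larger than everything before: a fresh run of length 1
        have hxP : x ∉ P := fun hxin =>
          hx (le_antisymm (hle _ (List.getLast_mem hPne)) (le_getLast_of_pairwise P hP hPne x hxin))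
        have hcond : ¬ st.2.2 = some x := by rw [h1]; simpa using hx
        have hstep : solutionAltStep st x = (max st.1 1, 1, some x) := by
          simp [solutionAltStep, hcond]
        rw [hstep]
        have hcx : P.count x = 0 := List.count_eq_zero.mpr hxP
        refine ⟨rfl, by simp [hcnt x, hcx], ?_, ?_⟩
        · rcases le_total 1 st.1 with hge | hlt
          · refine ⟨v0, by simp [hv0], ?_⟩
            have hvx : v0 ≠ x := fun h => hxP (h ▸ hv0)
            rw [max_eq_left hge, hcnt v0, if_neg hvx, hb0]; push_cast; ring
          · exact ⟨x, by simp, by simp [hcnt x, hcx, max_eq_right hlt]⟩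
        · intro v hv
          have hmaxl := le_max_left st.1 (1 : Int)
          have hmaxr := le_max_right st.1 (1 : Int)
          rcases List.mem_append.mp hv with hvP | hvx
          · have hvex : v ≠ x := fun h => hxP (h ▸ hvP)
            rw [hcnt v, if_neg hvex]
            have := h4 v hvP
            push_cast
            omega
          · simp at hvx; subst hvx
            rw [hcnt v, if_pos rfl, hcx]
            push_cast
            omega

-- B's result is a count attained in the length list and an upper bound on all counts
lemma solution_alt_spec (strArr : List String) (hne : strArr ≠ []) :
    (∃ v ∈ strArr.map (fun s => PySem.Str.len s),
        solution_alt strArr = ((strArr.map (fun s => PySem.Str.len s)).count v : Int))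
    ∧ (∀ v ∈ strArr.map (fun s => PySem.Str.len s),
        ((strArr.map (fun s => PySem.Str.len s)).count v : Int) ≤ solution_alt strArr) := by
  set L := strArr.map (fun s => PySem.Str.len s) with hL
  have hLne : L ≠ [] := by simpa [hL] using hne
  set S := PySem.List.sorted L (fun x => x) false with hS
  have hSne : S ≠ [] := by
    intro h; exact hLne ((PySem.List.sorted_eq_nil_iff L _ false).mp h)
  have hs : S.Pairwise (· ≤ ·) := PySem.List.sorted_pairwise L (fun x => x)
  obtain ⟨-, -, ⟨v, hv, hbv⟩, hub⟩ := run_fold_inv S hs hSne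
  have hperm : S.Perm L := PySem.List.sorted_perm L (fun x => x) false
  have hcnt : ∀ w, S.count w = L.count w := fun w => hperm.count_eq w
  have halt : solution_alt strArr = (S.foldl solutionAltStep (0, 0, none)).1 := rfl
  constructor
  · exact ⟨v, (PySem.List.mem_sorted L _ false v).mp hv, by rw [halt, hbv, hcnt v]⟩
  · intro w hw
    have := hub w ((PySem.List.mem_sorted L _ false w).mpr hw)
    rw [halt, ← hcnt w]
    exact this

-- ===== VERDICT (by name: the statement is the Claim_ definition above) =====
theorem solution_spec : Claim_equal_solution := by
  intro strArr _ hpre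
  unfold Spec_solution solution
  simp only [solution_dic_eq]
  set L := strArr.map (fun s => PySem.Str.len s) with hL
  have hLne : L ≠ [] := by simpa [hL] using hpre
  have hvals : (PySem.Dict.counter L).values = (PySem.Set.ofList L).map (fun k => (L.count k : Int)) := by
    show ((PySem.Dict.counter L).items).map (·.2) = _
    rw [PySem.Dict.items_counter]
    simp [List.map_map, Function.comp]
  rw [hvals]
  set V := (PySem.Set.ofList L).map (fun k => (L.count k : Int)) with hV
  have hVne : V ≠ [] := by
    obtain ⟨a, ha⟩ := List.exists_mem_of_ne_nil L hLne
    have : (L.count a : Int) ∈ V := List.mem_map_of_mem ((PySem.Set.mem_ofList L a).mpr ha)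
    exact List.ne_nil_of_mem this
  have hsne : PySem.List.sorted V (fun x => x) true ≠ [] := by
    intro h; exact hVne ((PySem.List.sorted_eq_nil_iff V _ true).mp h)
  obtain ⟨m, t, hmt⟩ := List.exists_cons_of_ne_nil hsne
  rw [hmt]
  have hget : (PySem.List.pyGet? (m :: t) 0).getD 0 = m := by
    simp [PySem.List.pyGet?, PySem.List.pyIdx?]
  rw [hget]
  -- m is an attained count bounding every count; so is solution_alt; hence equal
  have hmV : m ∈ V := by
    have : m ∈ PySem.List.sorted V (fun x => x) true := by rw [hmt]; simp
    exact (PySem.List.mem_sorted V _ true m).mp this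
  obtain ⟨k0, hk0, hmk⟩ := List.mem_map.mp hmV
  have hmax : ∀ y ∈ V, y ≤ m := PySem.List.key_head_sorted_rev_ge V (fun x => x) hmt
  obtain ⟨⟨w, hw, hbw⟩, hub⟩ := solution_alt_spec strArr hpre
  have h1 : m ≤ solution_alt strArr := by
    rw [← hmk]
    exact hub k0 ((PySem.Set.mem_ofList L k0).mp hk0)
  have h2 : solution_alt strArr ≤ m := by
    have : (L.count w : Int) ∈ V := List.mem_map_of_mem ((PySem.Set.mem_ofList L w).mpr hw)
    rw [hbw]
    exact hmax _ this
  omega
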